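-- pv_equiv track=rewrite | github.com/implse/Code_Challenges | Random/reverse_URL.py | un_reverse
-- ===== SOURCE A (Python) =====
-- def un_reverse(url):
--     stack = list()
--     output_url = ""
--     for char in url:
--         if char not in [":", "/", "."]:
--             stack.append(char)
--         else:
--             while len(stack) > 0:
--                 output_url += stack.pop()
--             output_url += char
--     if len(stack) > 0:
--         output_url += "".join(stack)[::-1]
--     return output_url
-- ===== SOURCE B (Python) =====
-- def un_reverse(url):
--     # Tokenize first: alternating [segment, delimiter, segment, ...] list,
--     # then reverse the even-indexed segments and join.
--     tokens = []
--     start = 0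
--     for i, ch in enumerate(url):
--         if ch in ":/.":
--             tokens.append(url[start:i])
--             tokens.append(ch)
--             start = i + 1
--     tokens.append(url[start:])
--     return "".join(t[::-1] if j % 2 == 0 else t for j, t in enumerate(tokens))
-- ===== Notes on version B (the rewrite author's own statement) =====
-- stated objective: alternative
-- what changed: Replaces A's single-pass character stack (push non-delimiters, pop-drain on each delimiter with per-character string +=) with a two-phase tokenize-then-map: split the string into an alternating segment/delimiter token list by index slicing, reverse the even-indexed segment tokens, and join once.
import Mathlib
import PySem

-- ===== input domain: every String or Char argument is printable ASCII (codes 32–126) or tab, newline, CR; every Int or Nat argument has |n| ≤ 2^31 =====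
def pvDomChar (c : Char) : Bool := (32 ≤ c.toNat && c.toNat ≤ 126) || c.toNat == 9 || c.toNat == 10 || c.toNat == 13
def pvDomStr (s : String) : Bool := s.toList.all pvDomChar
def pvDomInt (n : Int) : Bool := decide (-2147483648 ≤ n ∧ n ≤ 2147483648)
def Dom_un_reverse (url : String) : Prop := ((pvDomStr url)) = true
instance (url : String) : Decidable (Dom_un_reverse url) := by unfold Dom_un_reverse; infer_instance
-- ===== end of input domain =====

-- B tokenizes the URL first into alternating segment/delimiter tokens, then reverses the
-- even-indexed segment tokens and joins — a two-phase decomposition replacing A's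
-- single-pass character stack (objective: alternative/idiomatic decomposition, same cost).

-- ===== PORT A =====
-- Python stack (append/pop at the end) is represented top-at-head: append = cons,
-- the pop-while loop emits the stack top-first = out ++ stack, and the final
-- "".join(stack)[::-1] is likewise the top-at-head list itself.
def unLoop : List Char → List Char → List Char → List Char
  | [], stack, out => if stack.length > 0 then out ++ stack else out
  | c :: cs, stack, out =>
    if c ∉ [':', '/', '.'] then unLoop cs (c :: stack) out
    else unLoop cs [] (out ++ stack ++ [c])

def un_reverse (url : String) : String :=
  String.ofList (unLoop url.toList [] [])

-- ===== PORT B =====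
-- for i, ch in enumerate(url): recursion over the remaining chars carrying the index i.
-- url[start:i] with 0 ≤ start ≤ i ≤ len is exactly (cs.drop start).take (i - start)
-- (PySem.List.slice_natCast), and url[start:] is cs.drop start.
def altTok (cs : List Char) : List Char → Nat → List (List Char) → Nat → List (List Char) × Nat
  | [], _i, tokens, start => (tokens, start)
  | ch :: rest, i, tokens, start =>
    if ch ∈ [':', '/', '.'] then
      altTok cs rest (i + 1) (tokens ++ [(cs.drop start).take (i - start), [ch]]) (i + 1)
    else
      altTok cs rest (i + 1) tokens start

-- ''.join(t[::-1] if j % 2 == 0 else t for j, t in enumerate(tokens))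
def altJoin : Nat → List (List Char) → List Char
  | _, [] => []
  | j, t :: ts => (if j % 2 == 0 then t.reverse else t) ++ altJoin (j + 1) ts

def un_reverse_alt (url : String) : String :=
  let cs := url.toList
  let r := altTok cs cs 0 [] 0
  String.ofList (altJoin 0 (r.1 ++ [cs.drop r.2]))

-- ===== PRECONDITION & SPEC =====
def Spec_un_reverse (url : String) (out : String) : Prop := out = un_reverse_alt url
instance (url : String) (out : String) : Decidable (Spec_un_reverse url out) := by unfold Spec_un_reverse; infer_instance

-- ===== CLAIM (what is proved, stated in full; the proofs are below) =====
def Claim_equal_un_reverse : Prop := ∀ (url : String), Dom_un_reverse url → Spec_un_reverse url (un_reverse url)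

-- ===== LEMMAS AND PROOFS =====

-- Reference function: seg is the current segment with most-recent char at the head
-- (i.e. already reversed); on a delimiter it is flushed as-is.
def refRev : List Char → List Char → List Char
  | [], seg => seg
  | c :: cs, seg =>
    if c ∈ [':', '/', '.'] then seg ++ c :: refRev cs []
    else refRev cs (c :: seg)

theorem unLoop_eq_refRev (cs : List Char) : ∀ (stack out : List Char),
    unLoop cs stack out = out ++ refRev cs stack := by
  induction cs with
  | nil =>
    intro stack out
    cases stack <;> simp [unLoop, refRev]
  | cons c cs ih =>
    intro stack out
    by_cases h : c ∈ [':', '/', '.'] <;>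
      simp [unLoop, refRev, h, ih]

theorem altJoin_parity (ts : List (List Char)) : ∀ (j k : Nat), j % 2 = k % 2 →
    altJoin j ts = altJoin k ts := by
  induction ts with
  | nil => intro j k _; rfl
  | cons t ts ih =>
    intro j k h
    simp only [altJoin, h, ih (j + 1) (k + 1) (by omega)]

theorem altJoin_append (a : List (List Char)) : ∀ (b : List (List Char)) (j : Nat),
    altJoin j (a ++ b) = altJoin j a ++ altJoin (j + a.length) b := by
  induction a with
  | nil => intro b j; simp [altJoin]
  | cons t a ih =>
    intro b j
    simp only [List.cons_append, altJoin, ih, List.length_cons, List.append_assoc]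
    have h : j + 1 + a.length = j + (a.length + 1) := by omega
    rw [h]

theorem altTok_main (cs : List Char) : ∀ (xs : List Char) (i : Nat)
    (tokens : List (List Char)) (start : Nat),
    start ≤ i → cs.drop i = xs → tokens.length % 2 = 0 →
    altJoin 0 ((altTok cs xs i tokens start).1 ++
        [cs.drop (altTok cs xs i tokens start).2]) =
      altJoin 0 tokens ++ refRev xs ((cs.drop start).take (i - start)).reverse := by
  intro xs
  induction xs with
  | nil =>
    intro i tokens start hsi hdrop heven
    have hlen : cs.length ≤ i := by
      have := congrArg List.length hdrop
      simp at this; omega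
    have htake : (cs.drop start).take (i - start) = cs.drop start := by
      apply List.take_of_length_le
      simp; omega
    rw [altTok, altJoin_append, htake,
      altJoin_parity [cs.drop start] (0 + tokens.length) 0 (by omega)]
    simp [altJoin, refRev]
  | cons x rest ih =>
    intro i tokens start hsi hdrop heven
    have hx : cs[i]? = some x := by
      have h0 : (cs.drop i)[0]? = cs[i + 0]? := List.getElem?_drop
      rw [hdrop] at h0
      simpa using h0.symm
    have hrest : cs.drop (i + 1) = rest := by
      have : cs.drop (i + 1) = (cs.drop i).drop 1 := by
        rw [List.drop_drop]
      rw [this, hdrop]; rfl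
    by_cases h : x ∈ [':', '/', '.']
    · rw [altTok, if_pos h]
      rw [ih (i + 1) (tokens ++ [(cs.drop start).take (i - start), [x]]) (i + 1)
        (le_refl _) hrest (by simp; omega)]
      rw [altJoin_append]
      rw [altJoin_parity _ (0 + tokens.length) 0 (by omega)]
      simp [altJoin, refRev, h, List.append_assoc]
    · rw [altTok, if_neg h]
      rw [ih (i + 1) tokens start (by omega) hrest heven]
      have hseg : (cs.drop start).take (i + 1 - start) =
          (cs.drop start).take (i - start) ++ [x] := by
        have hstep : i + 1 - start = (i - start) + 1 := by omega
        rw [hstep, List.take_add_one, List.getElem?_drop]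
        have : start + (i - start) = i := by omega
        rw [this, hx]; rfl
      rw [hseg]
      simp [refRev, h]

theorem alt_eq_refRev (url : String) :
    un_reverse_alt url = String.ofList (refRev url.toList []) := by
  unfold un_reverse_alt
  simp only
  rw [altTok_main url.toList url.toList 0 [] 0 (le_refl 0) (by simp) (by simp)]
  simp [altJoin]

-- ===== VERDICT (by name: the statement is the Claim_ definition above) =====
theorem un_reverse_spec : Claim_equal_un_reverse := by
  intro url _
  unfold Spec_un_reverse un_reverse
  rw [alt_eq_refRev, unLoop_eq_refRev]
  simp
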